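-- pv_equiv track=rewrite | github.com/NoMoreActimel/Internalize_CoT_Step_by_Step | src/subprosqa/generate_shared_graph_cot_old.py | _generate_reasoning_steps
-- ===== SOURCE A (Python) =====
-- from typing import Dict, List, Set, Tuple, Optional, Any
--
-- def _generate_reasoning_steps(path: List[str]) -> List[str]:
--     """Generate human-readable reasoning steps from a path."""
--     steps = []
--
--     for i in range(len(path) - 1):
--         from_node = path[i]
--         to_node = path[i + 1]
--
--         # Create reasoning step
--         if from_node.startswith("entity_"):
--             from_desc = f"Entity {from_node.split('_')[1]}"
--         else:
--             from_desc = f"Concept {from_node.split('_')[1]}"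
--
--         if to_node.startswith("entity_"):
--             to_desc = f"Entity {to_node.split('_')[1]}"
--         else:
--             to_desc = f"Concept {to_node.split('_')[1]}"
--
--         step = f"{from_desc} is connected to {to_desc}."
--         steps.append(step)
--
--     return steps
-- ===== SOURCE B (Python) =====
-- from typing import List
--
--
-- def _desc(node: str) -> str:
--     if node.startswith("entity_"):
--         return f"Entity {node.split('_')[1]}"
--     return f"Concept {node.split('_')[1]}"
--
--
-- def _steps_from(prev_desc: str, rest: List[str]) -> List[str]:
--     """Structural recursion over the tail, carrying the previous node's
--     description so each description is computed exactly once."""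
--     if not rest:
--         return []
--     cur = _desc(rest[0])
--     return [f"{prev_desc} is connected to {cur}."] + _steps_from(cur, rest[1:])
--
--
-- def _generate_reasoning_steps(path: List[str]) -> List[str]:
--     """Recursive formulation: no index loop, no adjacent-pair indexing."""
--     if len(path) < 2:
--         return []
--     return _steps_from(_desc(path[0]), path[1:])
-- ===== Notes on version B (the rewrite author's own statement) =====
-- stated objective: alternative
-- what changed: Replaced A's index loop over range(len-1), which re-derives each interior node's description twice, with a structural recursion over the list tail that threads the previous node's description through as an accumulator, computing each description once and never indexing.
import Mathlib
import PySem

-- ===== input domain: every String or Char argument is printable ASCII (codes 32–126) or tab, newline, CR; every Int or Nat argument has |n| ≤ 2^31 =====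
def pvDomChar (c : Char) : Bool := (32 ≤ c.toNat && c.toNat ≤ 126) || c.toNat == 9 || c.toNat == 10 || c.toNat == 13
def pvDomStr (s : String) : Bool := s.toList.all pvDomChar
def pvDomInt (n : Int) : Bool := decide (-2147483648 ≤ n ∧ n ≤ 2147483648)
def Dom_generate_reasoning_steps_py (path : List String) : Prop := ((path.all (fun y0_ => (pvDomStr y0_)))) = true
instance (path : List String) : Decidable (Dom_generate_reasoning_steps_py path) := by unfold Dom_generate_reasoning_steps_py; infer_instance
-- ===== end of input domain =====

-- B replaces A's index loop (which formats each interior node's description twice)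
-- by a structural recursion over the tail carrying the previous description as an
-- accumulator; objective: alternative (index-free, each description computed once).


-- ===== PORT A =====
-- literal transliteration of A's index loop: for i in range(len(path)-1), with
-- the from/to descriptions recomputed inline each iteration; split('_')[1] is
-- pyGetD over split? (none/default is unreachable inside Pre_).
def generate_reasoning_steps_py (path : List String) : List String :=
  (PySem.List.pyRange 0 ((path.length : Int) - 1) 1).foldl
    (fun steps i =>
      let from_node := PySem.List.pyGetD path i ""
      let to_node := PySem.List.pyGetD path (i + 1) ""
      let from_desc :=
        if PySem.Str.startswith from_node "entity_" = true then
          PySem.Str.join "" ["Entity ", PySem.List.pyGetD ((PySem.Str.split? from_node "_").getD []) 1 ""]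
        else
          PySem.Str.join "" ["Concept ", PySem.List.pyGetD ((PySem.Str.split? from_node "_").getD []) 1 ""]
      let to_desc :=
        if PySem.Str.startswith to_node "entity_" = true then
          PySem.Str.join "" ["Entity ", PySem.List.pyGetD ((PySem.Str.split? to_node "_").getD []) 1 ""]
        else
          PySem.Str.join "" ["Concept ", PySem.List.pyGetD ((PySem.Str.split? to_node "_").getD []) 1 ""]
      steps ++ [PySem.Str.join "" [from_desc, " is connected to ", to_desc, "."]])
    []

-- ===== PORT B =====
-- helper _desc of Source B
def pvDesc (node : String) : String :=
  if PySem.Str.startswith node "entity_" = true then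
    PySem.Str.join "" ["Entity ", PySem.List.pyGetD ((PySem.Str.split? node "_").getD []) 1 ""]
  else
    PySem.Str.join "" ["Concept ", PySem.List.pyGetD ((PySem.Str.split? node "_").getD []) 1 ""]

-- helper _steps_from of Source B: recursion on the tail, previous description carried
def pvStepsFrom (prev_desc : String) (rest : List String) : List String :=
  match rest with
  | [] => []
  | node :: tl =>
    let cur := pvDesc node
    PySem.Str.join "" [prev_desc, " is connected to ", cur, "."] :: pvStepsFrom cur tl

def generate_reasoning_steps_py_alt (path : List String) : List String :=
  if path.length < 2 then [] else
  match path with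
  | [] => []
  | h :: t => pvStepsFrom (pvDesc h) t

-- ===== PRECONDITION & SPEC =====
-- Pre_ excludes exactly the inputs where Python A raises IndexError: paths of
-- length ≥ 2 containing a node without '_' (split('_')[1] does not exist there).
def Pre_generate_reasoning_steps_py (path : List String) : Prop :=
  2 ≤ path.length → (path.all (fun s => PySem.Str.isIn "_" s)) = true
instance (path : List String) : Decidable (Pre_generate_reasoning_steps_py path) := by unfold Pre_generate_reasoning_steps_py; infer_instance
def pvWitness_generate_reasoning_steps_py : List String := ["entity_1", "concept_2"]

def Spec_generate_reasoning_steps_py (path : List String) (out : List String) : Prop := out = generate_reasoning_steps_py_alt path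
instance (path : List String) (out : List String) : Decidable (Spec_generate_reasoning_steps_py path out) := by unfold Spec_generate_reasoning_steps_py; infer_instance

-- ===== CLAIM =====
def Claim_equal_generate_reasoning_steps_py : Prop := ∀ (path : List String), Dom_generate_reasoning_steps_py path → Pre_generate_reasoning_steps_py path → Spec_generate_reasoning_steps_py path (generate_reasoning_steps_py path)

-- ===== LEMMAS AND PROOFS =====

-- A's loop produces exactly the step on the descriptions of path[k], path[k+1]
theorem pvA_eq_map (path : List String) :
    generate_reasoning_steps_py path =
      (List.range (path.length - 1)).map (fun (k : Nat) =>
        PySem.Str.join "" [pvDesc (path.getD k ""),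
          " is connected to ", pvDesc (path.getD (k + 1) ""), "."]) := by
  unfold generate_reasoning_steps_py
  rw [PySem.List.foldl_append_singleton_eq_map, PySem.List.pyRange_one]
  have h : ((path.length : Int) - 1 - 0).toNat = path.length - 1 := by omega
  rw [h, List.map_map, List.nil_append]
  refine List.map_congr_left (fun k hk => ?_)
  have e0 : (0 : Int) + (k : Int) = ((k : Nat) : Int) := by push_cast; ring
  have e1 : ((k : Nat) : Int) + 1 = ((k + 1 : Nat) : Int) := by push_cast; ring
  simp only [pvDesc, Function.comp_apply, e0, e1, PySem.List.pyGetD_natCast]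

-- B's recursion unrolls to the same indexed map over a::rest
theorem pvStepsFrom_eq_map (rest : List String) (a : String) :
    pvStepsFrom (pvDesc a) rest =
      (List.range rest.length).map (fun (k : Nat) =>
        PySem.Str.join "" [pvDesc ((a :: rest).getD k ""),
          " is connected to ", pvDesc ((a :: rest).getD (k + 1) ""), "."]) := by
  induction rest generalizing a with
  | nil => simp [pvStepsFrom]
  | cons b tl ih =>
    show _ :: _ = _
    rw [List.length_cons, List.range_succ_eq_map, List.map_cons, List.map_map]
    congr 1
    rw [ih b]
    refine List.map_congr_left (fun k hk => ?_)
    simp only [Function.comp_apply, List.getD_cons_succ]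

theorem generate_reasoning_steps_py_eq (path : List String) :
    generate_reasoning_steps_py path = generate_reasoning_steps_py_alt path := by
  rw [pvA_eq_map]
  cases path with
  | nil => rfl
  | cons a rest =>
    unfold generate_reasoning_steps_py_alt
    by_cases h : (a :: rest).length < 2
    · have h0 : rest = [] := by
        cases rest with
        | nil => rfl
        | cons _ _ => exfalso; simp only [List.length_cons] at h; omega
      subst h0; simp
    · simp only [h, if_false]
      have hl : (a :: rest).length - 1 = rest.length := by simp
      rw [hl, pvStepsFrom_eq_map rest a]

-- ===== VERDICT =====
theorem generate_reasoning_steps_py_spec : Claim_equal_generate_reasoning_steps_py := by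
  intro path _ _
  exact (generate_reasoning_steps_py_eq path).symm ▸ rfl
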